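-- pv_equiv track=rewrite | github.com/ff781/rl | run.py | impute
-- ===== SOURCE A (Python) =====
-- import copy
--
-- def impute(framework, config):
--     def _impute(framework, config):
--         if isinstance(framework, dict) and isinstance(config, dict):
--             for k, v in framework.items():
--                 if k in config:
--                     framework[k] = _impute(v, config[k])
--         return config
--     framework = copy.deepcopy(framework)
--     _impute(framework, config)
--     return framework
-- ===== SOURCE B (Python) =====
-- import copy
--
--
-- def impute(framework, config):
--     # Shallow merge: A's recursive helper always returns its config argument,
--     # so the net effect is a single dict comprehension over framework's items.
--     if isinstance(framework, dict) and isinstance(config, dict):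
--         return {k: config.get(k, v) for k, v in framework.items()}
--     return copy.deepcopy(framework)
-- ===== Notes on version B (the rewrite author's own statement) =====
-- stated objective: simpler
-- what changed: A deep-copies framework and mutates it in a loop driven by a recursive helper whose recursion is dead (it always returns its config argument); B replaces all of that with a single dict comprehension {k: config.get(k, v) for k, v in framework.items()}.
import Mathlib
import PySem

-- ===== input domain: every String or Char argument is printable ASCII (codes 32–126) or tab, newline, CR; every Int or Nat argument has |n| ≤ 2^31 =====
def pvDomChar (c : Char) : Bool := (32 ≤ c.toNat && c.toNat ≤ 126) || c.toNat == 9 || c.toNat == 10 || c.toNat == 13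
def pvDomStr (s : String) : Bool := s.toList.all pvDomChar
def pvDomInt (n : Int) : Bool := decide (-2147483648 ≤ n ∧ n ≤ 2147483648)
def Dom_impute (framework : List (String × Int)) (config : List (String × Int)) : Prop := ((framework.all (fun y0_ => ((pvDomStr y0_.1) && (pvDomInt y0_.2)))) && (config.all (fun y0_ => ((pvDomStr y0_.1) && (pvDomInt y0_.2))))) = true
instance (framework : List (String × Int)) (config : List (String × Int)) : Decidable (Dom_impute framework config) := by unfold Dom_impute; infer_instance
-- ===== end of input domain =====

-- B replaces A's deepcopy + mutate-in-loop (with a dead recursive helper) by one map over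
-- framework's items, looking each key up in config: same value, simpler decomposition.


-- ===== PORT A =====
-- the loop body: `if k in config: framework[k] = _impute(v, config[k])`; here the values are
-- ints, so `_impute(v, config[k])` falls through its isinstance test and returns `config[k]`.
def imputeStep (config : List (String × Int)) (d : PySem.Dict String Int) (kv : String × Int) : PySem.Dict String Int :=
  match (PySem.Dict.mk config).get? kv.1 with
  | some v => d.insert kv.1 v
  | none => d

-- `framework = copy.deepcopy(framework)` is the identity on a dict of ints (no aliasing is
-- observable in the return value); then mutate the dict by the loop and return its items.
def impute (framework : List (String × Int)) (config : List (String × Int)) : List (String × Int) :=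
  (framework.foldl (imputeStep config) (PySem.Dict.mk framework)).items

-- ===== PORT B =====
-- `{k: config.get(k, v) for k, v in framework.items()}` (the isinstance test is always true
-- on the typed domain dict[str, int] × dict[str, int]).
def impute_alt (framework : List (String × Int)) (config : List (String × Int)) : List (String × Int) :=
  framework.map (fun kv => (kv.1, (PySem.Dict.mk config).getD kv.1 kv.2))

-- ===== PRECONDITION & SPEC =====
-- Pre_ admits exactly the association lists that represent a Python dict (distinct keys):
-- a duplicate-keyed list is not the image of any Python input to A, which takes dicts.
def Pre_impute (framework : List (String × Int)) (_config : List (String × Int)) : Prop :=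
  (framework.map Prod.fst).Nodup

instance (framework : List (String × Int)) (config : List (String × Int)) : Decidable (Pre_impute framework config) := by unfold Pre_impute; infer_instance

def pvWitness_impute : (List (String × Int)) × (List (String × Int)) :=
  ([("a", 1), ("b", 2)], [("b", 9), ("c", 7)])

def Spec_impute (framework : List (String × Int)) (config : List (String × Int)) (out : List (String × Int)) : Prop := out = impute_alt framework config
instance (framework : List (String × Int)) (config : List (String × Int)) (out : List (String × Int)) : Decidable (Spec_impute framework config out) := by unfold Spec_impute; infer_instance

-- ===== CLAIM (what is proved, stated in full; the proofs are below) =====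
def Claim_equal_impute : Prop := ∀ (framework : List (String × Int)) (config : List (String × Int)), Dom_impute framework config → Pre_impute framework config → Spec_impute framework config (impute framework config)

-- ===== LEMMAS AND PROOFS =====

-- overwriting a key that is not among t's keys leaves t's items unchanged
lemma map_if_untouched (t : List (String × Int)) (k : String) (v : Int)
    (h : k ∉ t.map Prod.fst) :
    t.map (fun p => if (p.1 == k) = true then (k, v) else p) = t := by
  induction t with
  | nil => rfl
  | cons p r ih =>
    simp only [List.map_cons] at h ⊢
    have hne : p.1 ≠ k := fun he => h (by simp [he])
    rw [if_neg (by simpa using hne), ih (fun hm => h (List.mem_cons_of_mem _ hm))]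

-- one loop step on a dict with a fresh head leaves the head alone
lemma imputeStep_mk_cons (config : List (String × Int)) (p : String × Int)
    (d : PySem.Dict String Int) (kv : String × Int) (h : (p.1 == kv.1) = false) :
    imputeStep config (PySem.Dict.mk (p :: d.items)) kv
      = PySem.Dict.mk (p :: (imputeStep config d kv).items) := by
  unfold imputeStep
  have hne : p.1 ≠ kv.1 := by simpa using h
  cases hc : (PySem.Dict.mk config).get? kv.1 with
  | none => rfl
  | some v =>
    apply PySem.Dict.ext
    by_cases hd : d.contains kv.1 = true
    · have hd' : (PySem.Dict.mk (p :: d.items)).contains kv.1 = true := by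
        simp only [PySem.Dict.contains_mk, List.any_cons]
        simp only [PySem.Dict.contains] at hd
        simp [hd]
      rw [PySem.Dict.items_insert_of_contains _ _ hd',
          PySem.Dict.items_insert_of_contains _ _ hd]
      simp [hne]
    · have hd0 : d.contains kv.1 = false := by simpa using hd
      have hd' : (PySem.Dict.mk (p :: d.items)).contains kv.1 = false := by
        simp only [PySem.Dict.contains_mk, List.any_cons]
        simp only [PySem.Dict.contains] at hd0
        simp [h, hd0]
      rw [PySem.Dict.items_insert_of_not_contains _ _ hd',
          PySem.Dict.items_insert_of_not_contains _ _ hd0]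
      rfl

-- folding keys that all differ from the head key keeps the head entry in place
lemma fold_mk_cons (config : List (String × Int)) (l : List (String × Int))
    (p : String × Int) (d : PySem.Dict String Int)
    (h : ∀ kv ∈ l, (p.1 == kv.1) = false) :
    (l.foldl (imputeStep config) (PySem.Dict.mk (p :: d.items))).items
      = p :: (l.foldl (imputeStep config) d).items := by
  induction l generalizing d with
  | nil => rfl
  | cons kv t ih =>
    simp only [List.foldl_cons]
    rw [imputeStep_mk_cons config p d kv (h kv (by simp))]
    exact ih (imputeStep config d kv) (fun kv' hkv' => h kv' (by simp [hkv']))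

-- the whole loop, started on the dict made of the remaining items themselves
lemma impute_eq_alt (config : List (String × Int)) :
    ∀ (framework : List (String × Int)), (framework.map Prod.fst).Nodup →
      (framework.foldl (imputeStep config) (PySem.Dict.mk framework)).items
        = impute_alt framework config := by
  intro framework
  induction framework with
  | nil => intro _; rfl
  | cons kv t ih =>
    intro hnd
    rw [List.map_cons, List.nodup_cons] at hnd
    obtain ⟨hnotin, hndt⟩ := hnd
    simp only [List.foldl_cons]
    -- the first step rewrites the head entry of the dict
    have hstep : imputeStep config (PySem.Dict.mk (kv :: t)) kv
        = PySem.Dict.mk ((kv.1, (PySem.Dict.mk config).getD kv.1 kv.2) :: t) := by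
      unfold imputeStep
      rw [PySem.Dict.getD_eq_get?_getD]
      cases hc : (PySem.Dict.mk config).get? kv.1 with
      | none => rfl
      | some v =>
        apply PySem.Dict.ext
        have hcont : (PySem.Dict.mk (kv :: t)).contains kv.1 = true := by
          simp [PySem.Dict.contains_mk]
        rw [PySem.Dict.items_insert_of_contains _ _ hcont]
        simp only [Option.getD_some, List.map_cons]
        congr 1
        · simp
        · rw [map_if_untouched t kv.1 v hnotin]
    rw [hstep]
    have hfresh : ∀ kv' ∈ t, ((kv.1, (PySem.Dict.mk config).getD kv.1 kv.2).1 == kv'.1) = false := by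
      intro kv' hkv'
      have : kv.1 ≠ kv'.1 := by
        intro he
        exact hnotin (he ▸ List.mem_map_of_mem hkv')
      simpa using this
    have := fold_mk_cons config t (kv.1, (PySem.Dict.mk config).getD kv.1 kv.2) (PySem.Dict.mk t) hfresh
    rw [this]
    simp only [impute_alt, List.map_cons]
    congr 1
    exact ih hndt

-- ===== VERDICT (by name: the statement is the Claim_ definition above) =====
theorem impute_spec : Claim_equal_impute := by
  intro framework config _hdom hpre
  unfold Spec_impute impute
  exact impute_eq_alt config framework hpre
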